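-- pv_equiv track=rewrite | github.com/JunYuHuang/harvard-cs50-2025 | problem-sets/6/sentimental-credit/credit.py | first_n_digits
-- ===== SOURCE A (Python) =====
-- def count_digits(number):
--     res = 1
--     while number > 9:
--         number //= 10
--         res += 1
--     return res
--
-- def first_n_digits(number, n):
--     if n < 1:
--         return -1
--     if number < 10:
--         return number
--
--     i = count_digits(number) - 1
--     multiplier = 1
--     res = 0
--
--     while number != 0:
--         if i < n:
--             digit = number % 10
--             digit *= multiplier
--             res += digit
--             multiplier *= 10
--         number //= 10
--         i -= 1
--     return res
-- ===== SOURCE B (Python) =====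
-- def num_digits(number):
--     return 1 if number < 10 else 1 + num_digits(number // 10)
--
-- def first_n_digits(number, n):
--     if n < 1:
--         return -1
--     if number < 10:
--         return number
--     d = num_digits(number)
--     return number if n >= d else number // 10 ** (d - n)
-- ===== Notes on version B (the rewrite author's own statement) =====
-- stated objective: simpler
-- what changed: Replaces A's per-digit accumulation loop with index/multiplier bookkeeping by one closed-form floor division: compute the digit count d (small recursive helper) and return number // 10**(d-n) (the whole number when n >= d).
import Mathlib
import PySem

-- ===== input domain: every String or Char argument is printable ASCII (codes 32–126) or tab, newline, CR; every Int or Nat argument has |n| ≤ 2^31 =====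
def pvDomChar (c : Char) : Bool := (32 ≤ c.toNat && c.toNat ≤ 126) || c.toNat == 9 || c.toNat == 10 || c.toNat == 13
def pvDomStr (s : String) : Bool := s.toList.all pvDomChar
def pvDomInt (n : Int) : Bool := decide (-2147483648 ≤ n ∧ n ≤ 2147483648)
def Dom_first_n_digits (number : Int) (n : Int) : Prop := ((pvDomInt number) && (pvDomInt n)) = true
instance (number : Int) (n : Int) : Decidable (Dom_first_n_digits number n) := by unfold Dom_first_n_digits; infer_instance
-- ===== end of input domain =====

-- B replaces A's per-digit accumulation loop by one closed-form floor division number // 10^(d-n); objective: simpler.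

-- ===== PORT A =====
-- A's count_digits: res = 1; while number > 9: number //= 10; res += 1
def count_digits_loop (number : Int) (res : Int) : Int :=
  if 9 < number then count_digits_loop (PySem.Int.floordiv number 10) (res + 1) else res
termination_by number.toNat
decreasing_by
  rw [PySem.Int.floordiv_eq_ediv_of_pos (by omega : (0:Int) < 10)]
  omega

def count_digits (number : Int) : Int := count_digits_loop number 1

-- A's main while-loop over the state (number, i, multiplier, res).
-- The '0 < number' guard is a totality guard only: Python diverges on a negative
-- number here, and first_n_digits never reaches the loop with number < 10.
def first_n_digits_loop (n : Int) (number : Int) (i : Int) (multiplier : Int) (res : Int) : Int :=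
  if 0 < number then
    if i < n then
      first_n_digits_loop n (PySem.Int.floordiv number 10) (i - 1) (multiplier * 10)
        (res + PySem.Int.mod number 10 * multiplier)
    else
      first_n_digits_loop n (PySem.Int.floordiv number 10) (i - 1) multiplier res
  else res
termination_by number.toNat
decreasing_by
  all_goals rw [PySem.Int.floordiv_eq_ediv_of_pos (by omega : (0:Int) < 10)]
  all_goals omega

def first_n_digits (number : Int) (n : Int) : Int :=
  if n < 1 then -1
  else if number < 10 then number
  else first_n_digits_loop n number (count_digits number - 1) 1 0

-- ===== PORT B =====
def num_digits (number : Int) : Int :=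
  if number < 10 then 1 else 1 + num_digits (PySem.Int.floordiv number 10)
termination_by number.toNat
decreasing_by
  rw [PySem.Int.floordiv_eq_ediv_of_pos (by omega : (0:Int) < 10)]
  omega

def first_n_digits_alt (number : Int) (n : Int) : Int :=
  if n < 1 then -1
  else if number < 10 then number
  else
    let d := num_digits number
    -- Python's 10 ** (d - n) with d - n ≥ 1 on this branch, so .toNat is exact
    if n ≥ d then number else PySem.Int.floordiv number (10 ^ (d - n).toNat)

-- ===== PRECONDITION & SPEC =====
def Spec_first_n_digits (number : Int) (n : Int) (out : Int) : Prop := out = first_n_digits_alt number n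
instance (number : Int) (n : Int) (out : Int) : Decidable (Spec_first_n_digits number n out) := by unfold Spec_first_n_digits; infer_instance

-- ===== CLAIM (what is proved, stated in full; the proofs are below) =====
def Claim_equal_first_n_digits : Prop := ∀ (number : Int) (n : Int), Dom_first_n_digits number n → Spec_first_n_digits number n (first_n_digits number n)

-- ===== LEMMAS AND PROOFS =====

-- A's iterative digit count equals B's recursive one.
theorem count_digits_loop_eq (m : Int) (r : Int) :
    count_digits_loop m r = r + num_digits m - 1 := by
  by_cases h : 9 < m
  · rw [count_digits_loop, num_digits, if_pos h, if_neg (by omega)]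
    rw [count_digits_loop_eq (PySem.Int.floordiv m 10) (r + 1)]
    ring
  · rw [count_digits_loop, num_digits, if_neg h, if_pos (by omega)]
    ring
termination_by m.toNat
decreasing_by
  rw [PySem.Int.floordiv_eq_ediv_of_pos (by omega : (0:Int) < 10)]
  omega

theorem floordiv_pow_ten (a : Int) (t : Nat)  :
    PySem.Int.floordiv a ((10:Int) ^ t) = a / 10 ^ t := by
  exact PySem.Int.floordiv_eq_ediv_of_pos (by positivity)

-- Closed form of A's main loop: the kept digits of m are m // 10^(i-n+1).
theorem first_n_digits_loop_eq (n m i mult res : Int) (hm : 0 ≤ m) :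
    first_n_digits_loop n m i mult res = res + mult * (m / 10 ^ (i - n + 1).toNat) := by
  by_cases hp : 0 < m
  · by_cases hi : i < n
    · rw [first_n_digits_loop, if_pos hp, if_pos hi]
      rw [first_n_digits_loop_eq n _ _ _ _
        (by rw [PySem.Int.floordiv_eq_ediv_of_pos (by omega : (0:Int) < 10)]; omega)]
      have h1 : (i - n + 1).toNat = 0 := by omega
      have h2 : (i - 1 - n + 1).toNat = 0 := by omega
      rw [h1, h2]
      rw [PySem.Int.floordiv_eq_ediv_of_pos (by omega : (0:Int) < 10),
        PySem.Int.mod_eq_emod_of_pos (by omega : (0:Int) < 10)]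
      simp only [pow_zero, Int.ediv_one]
      have hme : 10 * (m / 10) + m % 10 = m := Int.mul_ediv_add_emod m 10
      linear_combination mult * hme
    · rw [first_n_digits_loop, if_pos hp, if_neg hi]
      rw [first_n_digits_loop_eq n _ _ _ _
        (by rw [PySem.Int.floordiv_eq_ediv_of_pos (by omega : (0:Int) < 10)]; omega)]
      have ht : (i - n + 1).toNat = (i - 1 - n + 1).toNat + 1 := by omega
      rw [PySem.Int.floordiv_eq_ediv_of_pos (by omega : (0:Int) < 10), ht, pow_succ']
      rw [show m / 10 / 10 ^ (i - 1 - n + 1).toNat = m / (10 * 10 ^ (i - 1 - n + 1).toNat) from Int.ediv_ediv_of_nonneg (by omega)]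
  · have hm0 : m = 0 := by omega
    rw [first_n_digits_loop, if_neg hp, hm0]
    simp
termination_by m.toNat
decreasing_by
  all_goals rw [PySem.Int.floordiv_eq_ediv_of_pos (by omega : (0:Int) < 10)]
  all_goals omega

theorem num_digits_pos (m : Int) : 1 ≤ num_digits m := by
  by_cases h : m < 10
  · rw [num_digits, if_pos h]
  · rw [num_digits, if_neg h]
    have := num_digits_pos (PySem.Int.floordiv m 10)
    omega
termination_by m.toNat
decreasing_by
  rw [PySem.Int.floordiv_eq_ediv_of_pos (by omega : (0:Int) < 10)]
  omega

-- ===== VERDICT (by name: the statement is the Claim_ definition above) =====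
theorem first_n_digits_spec : Claim_equal_first_n_digits := by
  intro number n _
  unfold Spec_first_n_digits first_n_digits first_n_digits_alt
  by_cases hn : n < 1
  · simp [hn]
  · rw [if_neg hn, if_neg hn]
    by_cases hnum : number < 10
    · rw [if_pos hnum, if_pos hnum]
    · rw [if_neg hnum, if_neg hnum]
      have hd := count_digits_loop_eq number 1
      have hpos := num_digits_pos number
      rw [count_digits, hd]
      rw [first_n_digits_loop_eq n number _ 1 0 (by omega)]
      have harg : (1 + num_digits number - 1 - 1 - n + 1).toNat = (num_digits number - n).toNat := by
        omega
      rw [harg]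
      by_cases hge : n ≥ num_digits number
      · rw [if_pos hge]
        have : (num_digits number - n).toNat = 0 := by omega
        rw [this]
        simp
      · rw [if_neg hge, floordiv_pow_ten number _]
        ring
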